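-- pv_equiv track=rewrite | github.com/nandan075/cyk-cfg-simulator | cnf_converter.py | _step4_replace_terminals
-- ===== SOURCE A (Python) =====
-- import copy
--
-- def _step4_replace_terminals(prods, nts, terms):
--     """
--     For productions with body length ≥ 2, replace each terminal
--     with a new non-terminal that produces just that terminal.
--     e.g., A -> aBc becomes A -> T_a B T_c, with T_a -> a, T_c -> c
--     """
--     terminal_map = {}  # terminal -> new non-terminal name
--
--     new_prods = copy.deepcopy(prods)
--
--     for nt in list(new_prods.keys()):
--         new_bodies = []
--         for body in new_prods[nt]:
--             if len(body) < 2: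
--                 new_bodies.append(body)
--                 continue
--
--             # Replace terminals in this body
--             new_body = []
--             for sym in body:
--                 if sym in terms:
--                     # Create or reuse a non-terminal for this terminal
--                     if sym not in terminal_map:
--                         new_nt_name = f"T_{sym}"
--                         while new_nt_name in nts:
--                             new_nt_name += "'"
--                         terminal_map[sym] = new_nt_name
--                         nts.add(new_nt_name)
--                     new_body.append(terminal_map[sym])
--                 else:
--                     new_body.append(sym)
--             new_bodies.append(new_body)
--
--         new_prods[nt] = new_bodies
--
--     # Add the terminal productions: T_a -> a
--     for term, new_nt in terminal_map.items():
--         new_prods[new_nt] = [[term]]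
--
--     return new_prods, nts, terms
-- ===== SOURCE B (Python) =====
-- def _step4_replace_terminals(prods, nts, terms):
--     """
--     For productions with body length >= 2, replace each terminal with a
--     fresh non-terminal producing just that terminal.
--     Two passes: first build the terminal -> new-non-terminal table in
--     first-encounter order, then rewrite all long bodies by pure lookup.
--     """
--     terminal_map = {}
--
--     # Pass 1: assign a fresh non-terminal to every terminal of a long body.
--     for bodies in prods.values():
--         for body in bodies:
--             if len(body) < 2:
--                 continue
--             for sym in body:
--                 if sym in terms and sym not in terminal_map:
--                     name = f"T_{sym}"
--                     while name in nts:
--                         name += "'"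
--                     terminal_map[sym] = name
--                     nts.add(name)
--
--     # Pass 2: rewrite every long body by table lookup (keys are terminals,
--     # so a non-terminal is never a key and maps to itself).
--     new_prods = {
--         nt: [body if len(body) < 2 else [terminal_map.get(s, s) for s in body]
--              for body in bodies]
--         for nt, bodies in prods.items()
--     }
--     for term, name in terminal_map.items():
--         new_prods[name] = [[term]]
--     return new_prods, nts, terms
-- ===== Notes on version B (the rewrite author's own statement) =====
-- stated objective: alternative
-- what changed: Splits A's single interleaved traversal into two passes: pass 1 builds the terminal-to-fresh-non-terminal table (first-encounter order) without rewriting, pass 2 rewrites every long body by a pure table lookup inside a dict comprehension, so the create-or-reuse branching disappears from the rewrite.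
import Mathlib
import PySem

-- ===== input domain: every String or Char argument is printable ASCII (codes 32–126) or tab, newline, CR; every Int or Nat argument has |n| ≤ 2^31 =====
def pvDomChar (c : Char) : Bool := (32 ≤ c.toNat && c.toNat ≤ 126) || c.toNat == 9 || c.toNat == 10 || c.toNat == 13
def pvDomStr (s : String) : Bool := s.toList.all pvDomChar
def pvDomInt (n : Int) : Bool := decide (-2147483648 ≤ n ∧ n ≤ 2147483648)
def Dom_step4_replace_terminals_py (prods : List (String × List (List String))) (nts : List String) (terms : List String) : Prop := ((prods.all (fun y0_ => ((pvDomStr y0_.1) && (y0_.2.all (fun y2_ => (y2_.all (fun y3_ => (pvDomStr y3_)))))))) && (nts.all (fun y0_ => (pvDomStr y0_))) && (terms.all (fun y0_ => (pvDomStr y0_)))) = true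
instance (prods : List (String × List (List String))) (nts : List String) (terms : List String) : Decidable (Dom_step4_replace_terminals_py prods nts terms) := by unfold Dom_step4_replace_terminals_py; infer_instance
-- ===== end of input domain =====

-- B is the hinted two-pass re-implementation of A (objective: alternative decomposition); both ports share the
-- fresh-name helper `pvFreshName`, which transliterates the identical `while name in nts: name += "'"` loop of
-- both Pythons.  Note: both A and B mutate the argument set `nts` in place in Python (it is also returned);
-- the equivalence proved here is about the returned triple.

-- termination measure for the fresh-name while loop (cited by `decreasing_by` of pvFreshName)
theorem pvFreshName_measure_lt (nts : List String) (name : String) (h : name ∈ nts) :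
    (nts.filter (fun s => decide ((name ++ "'").length ≤ s.length))).length <
      (nts.filter (fun s => decide (name.length ≤ s.length))).length := by
  have h1 : "'".length = 1 := rfl
  have hl : (name ++ "'").length = name.length + 1 := by
    rw [String.length_append, h1]
  rw [hl]
  induction nts with
  | nil => simp at h
  | cons a t ih =>
    have hmono : (t.filter (fun s => decide (name.length + 1 ≤ s.length))).length ≤
        (t.filter (fun s => decide (name.length ≤ s.length))).length := by
      rw [← List.countP_eq_length_filter, ← List.countP_eq_length_filter]
      exact List.countP_mono_left (fun a _ ha => by simp at ha ⊢; omega)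
    rcases List.mem_cons.1 h with rfl | hmem
    · rw [List.filter_cons_of_pos (p := fun (s : String) => decide (name.length ≤ s.length)) (by simp),
          List.filter_cons_of_neg (p := fun (s : String) => decide (name.length + 1 ≤ s.length)) (by simp)]
      exact Nat.lt_succ_of_le hmono
    · have hlt := ih hmem
      by_cases hq : (decide (name.length + 1 ≤ a.length)) = true
      · have hp : (decide (name.length ≤ a.length)) = true := by simp at hq ⊢; omega
        rw [List.filter_cons_of_pos (p := fun (s : String) => decide (name.length + 1 ≤ s.length)) hq,
           List.filter_cons_of_pos (p := fun (s : String) => decide (name.length ≤ s.length)) hp]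
        simpa using hlt
      · rw [List.filter_cons_of_neg (p := fun (s : String) => decide (name.length + 1 ≤ s.length)) (by simpa using hq)]
        by_cases hp : (decide (name.length ≤ a.length)) = true
        · rw [List.filter_cons_of_pos (p := fun (s : String) => decide (name.length ≤ s.length)) hp]
          exact Nat.lt_succ_of_lt hlt
        · rw [List.filter_cons_of_neg (p := fun (s : String) => decide (name.length ≤ s.length)) (by simpa using hp)]
          exact hlt

-- `while new_nt_name in nts: new_nt_name += "'"` (shared by both ports: the loop is identical in A and B)
def pvFreshName (nts : List String) (name : String) : String :=
  if _h : name ∈ nts then pvFreshName nts (name ++ "'") else name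
termination_by (nts.filter (fun s => decide (name.length ≤ s.length))).length
decreasing_by exact pvFreshName_measure_lt nts name _h

-- ===== PORT A =====
-- inner loop `for sym in body: …` of A (creates/reuses the fresh non-terminal while rewriting)
def pvProcSymA (terms : List String) (st : List String × PySem.Dict String String × List String)
    (sym : String) : List String × PySem.Dict String String × List String :=
  if sym ∈ terms then
    if st.2.1.contains sym then (st.1 ++ [st.2.1.getD sym ""], st.2.1, st.2.2)
    else
      let nn := pvFreshName st.2.2 ("T_" ++ sym)
      let tmap' := st.2.1.insert sym nn
      (st.1 ++ [tmap'.getD sym ""], tmap', PySem.Set.add st.2.2 nn)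
  else (st.1 ++ [sym], st.2.1, st.2.2)

-- `for body in new_prods[nt]: …` of A
def pvBodyStepA (terms : List String)
    (st : List (List String) × PySem.Dict String String × List String) (body : List String) :
    List (List String) × PySem.Dict String String × List String :=
  if body.length < 2 then (st.1 ++ [body], st.2)
  else
    let r := body.foldl (pvProcSymA terms) ([], st.2)
    (st.1 ++ [r.1], r.2)

-- `for nt in list(new_prods.keys()): … ; new_prods[nt] = new_bodies` of A
def pvKeyStepA (terms : List String)
    (st : PySem.Dict String (List (List String)) × PySem.Dict String String × List String)
    (nt : String) : PySem.Dict String (List (List String)) × PySem.Dict String String × List String :=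
  let r := (st.1.getD nt []).foldl (pvBodyStepA terms) ([], st.2)
  (st.1.insert nt r.1, r.2)

def step4_replace_terminals_py (prods : List (String × List (List String))) (nts : List String) (terms : List String) : (List (String × List (List String))) × List String × List String :=
  let newProds := PySem.Dict.ofList prods
  let r := newProds.keys.foldl (pvKeyStepA terms) (newProds, PySem.Dict.empty, nts)
  let final := r.2.1.items.foldl
    (fun (d : PySem.Dict String (List (List String))) p => d.insert p.2 [[p.1]]) r.1
  (final.items, r.2.2, terms)

-- ===== PORT B =====
-- pass 1 of B: `if sym in terms and sym not in terminal_map: …`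
def pvCollectSym (terms : List String) (st : PySem.Dict String String × List String)
    (sym : String) : PySem.Dict String String × List String :=
  if sym ∈ terms ∧ st.1.contains sym = false then
    let nn := pvFreshName st.2 ("T_" ++ sym)
    (st.1.insert sym nn, PySem.Set.add st.2 nn)
  else st

def pvCollectBody (terms : List String) (st : PySem.Dict String String × List String)
    (body : List String) : PySem.Dict String String × List String :=
  if body.length < 2 then st else body.foldl (pvCollectSym terms) st

def pvCollectBodies (terms : List String) (st : PySem.Dict String String × List String)
    (bodies : List (List String)) : PySem.Dict String String × List String :=
  bodies.foldl (pvCollectBody terms) st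

-- pass 2 of B: pure rewrite by table lookup
def pvRewriteBody (tmap : PySem.Dict String String) (body : List String) : List String :=
  if body.length < 2 then body else body.map (fun s => tmap.getD s s)

def step4_replace_terminals_py_alt (prods : List (String × List (List String))) (nts : List String) (terms : List String) : (List (String × List (List String))) × List String × List String :=
  let d := PySem.Dict.ofList prods
  let c := d.values.foldl (pvCollectBodies terms) (PySem.Dict.empty, nts)
  let newProds : PySem.Dict String (List (List String)) :=
    PySem.Dict.mk (d.items.map (fun p => (p.1, p.2.map (pvRewriteBody c.1))))
  let final := c.1.items.foldl
    (fun (dd : PySem.Dict String (List (List String))) p => dd.insert p.2 [[p.1]]) newProds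
  (final.items, c.2, terms)

-- ===== PRECONDITION & SPEC =====
def Spec_step4_replace_terminals_py (prods : List (String × List (List String))) (nts : List String) (terms : List String) (out : (List (String × List (List String))) × List String × List String) : Prop := out = step4_replace_terminals_py_alt prods nts terms
instance (prods : List (String × List (List String))) (nts : List String) (terms : List String) (out : (List (String × List (List String))) × List String × List String) : Decidable (Spec_step4_replace_terminals_py prods nts terms out) := by unfold Spec_step4_replace_terminals_py; infer_instance

-- ===== CLAIM (what is proved, stated in full; the proofs are below) =====
def Claim_equal_step4_replace_terminals_py : Prop := ∀ (prods : List (String × List (List String))) (nts : List String) (terms : List String), Dom_step4_replace_terminals_py prods nts terms → Spec_step4_replace_terminals_py prods nts terms (step4_replace_terminals_py prods nts terms)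

-- ===== LEMMAS AND PROOFS =====

-- `t' extends t`: every binding of t is still in t'
def pvExt (t t' : PySem.Dict String String) : Prop :=
  ∀ k v, t.get? k = some v → t'.get? k = some v

theorem pvExt_refl (t : PySem.Dict String String) : pvExt t t := fun _ _ h => h

theorem pvExt_trans {a b c : PySem.Dict String String} (h1 : pvExt a b) (h2 : pvExt b c) :
    pvExt a c := fun k v h => h2 k v (h1 k v h)

theorem pvExt_collectSym (terms : List String) (st : PySem.Dict String String × List String)
    (sym : String) : pvExt st.1 (pvCollectSym terms st sym).1 := by
  unfold pvCollectSym
  split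
  · rename_i h
    intro k v hk
    have hne : k ≠ sym := by
      intro he; subst he
      rw [PySem.Dict.contains_eq_isSome_get?, hk] at h
      simp at h
    rw [PySem.Dict.get?_insert_of_ne _ _ hne]
    exact hk
  · exact pvExt_refl _

theorem pvExt_foldl_collectSym (terms : List String) (body : List String)
    (st : PySem.Dict String String × List String) :
    pvExt st.1 (body.foldl (pvCollectSym terms) st).1 := by
  induction body generalizing st with
  | nil => exact pvExt_refl _
  | cons s rest ih =>
    exact pvExt_trans (pvExt_collectSym terms st s) (ih _)

theorem pvExt_collectBody (terms : List String) (st : PySem.Dict String String × List String)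
    (body : List String) : pvExt st.1 (pvCollectBody terms st body).1 := by
  unfold pvCollectBody
  split
  · exact pvExt_refl _
  · exact pvExt_foldl_collectSym terms body st

theorem pvExt_collectBodies (terms : List String) (bodies : List (List String))
    (st : PySem.Dict String String × List String) :
    pvExt st.1 (pvCollectBodies terms st bodies).1 := by
  unfold pvCollectBodies
  induction bodies generalizing st with
  | nil => exact pvExt_refl _
  | cons b rest ih =>
    exact pvExt_trans (pvExt_collectBody terms st b) (ih _)

theorem pvExt_collectVals (terms : List String) (vals : List (List (List String)))
    (st : PySem.Dict String String × List String) :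
    pvExt st.1 (vals.foldl (pvCollectBodies terms) st).1 := by
  induction vals generalizing st with
  | nil => exact pvExt_refl _
  | cons v rest ih =>
    exact pvExt_trans (pvExt_collectBodies terms v st) (ih _)

-- keys of the collected table are terminals
def pvKeysTerms (terms : List String) (t : PySem.Dict String String) : Prop :=
  ∀ k, t.contains k = true → k ∈ terms

theorem pvKeysTerms_collectSym (terms : List String) (st : PySem.Dict String String × List String)
    (sym : String) (h : pvKeysTerms terms st.1) :
    pvKeysTerms terms (pvCollectSym terms st sym).1 := by
  unfold pvCollectSym
  split
  · rename_i hc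
    intro k hk
    rw [PySem.Dict.contains_insert] at hk
    rcases Bool.or_eq_true_iff.1 hk with h1 | h1
    · have : k = sym := by simpa using h1
      subst this; exact hc.1
    · exact h k h1
  · exact h

theorem pvKeysTerms_foldl_collectSym (terms : List String) (body : List String)
    (st : PySem.Dict String String × List String) (h : pvKeysTerms terms st.1) :
    pvKeysTerms terms (body.foldl (pvCollectSym terms) st).1 := by
  induction body generalizing st with
  | nil => exact h
  | cons s rest ih => exact ih _ (pvKeysTerms_collectSym terms st s h)

theorem pvKeysTerms_collectBody (terms : List String) (st : PySem.Dict String String × List String)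
    (body : List String) (h : pvKeysTerms terms st.1) :
    pvKeysTerms terms (pvCollectBody terms st body).1 := by
  unfold pvCollectBody
  split
  · exact h
  · exact pvKeysTerms_foldl_collectSym terms body st h

theorem pvKeysTerms_collectBodies (terms : List String) (bodies : List (List String))
    (st : PySem.Dict String String × List String) (h : pvKeysTerms terms st.1) :
    pvKeysTerms terms (pvCollectBodies terms st bodies).1 := by
  unfold pvCollectBodies
  induction bodies generalizing st with
  | nil => exact h
  | cons b rest ih => exact ih _ (pvKeysTerms_collectBody terms st b h)

theorem pvKeysTerms_collectVals (terms : List String) (vals : List (List (List String)))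
    (st : PySem.Dict String String × List String) (h : pvKeysTerms terms st.1) :
    pvKeysTerms terms (vals.foldl (pvCollectBodies terms) st).1 := by
  induction vals generalizing st with
  | nil => exact h
  | cons v rest ih => exact ih _ (pvKeysTerms_collectBodies terms v st h)

-- one symbol of A's inner loop = append of the final-table lookup, state = B's pass-1 step
theorem pvProcSymA_eq (terms : List String) (nb : List String)
    (st : PySem.Dict String String × List String) (sym : String)
    (T : PySem.Dict String String)
    (hExt : pvExt (pvCollectSym terms st sym).1 T) (hK : pvKeysTerms terms T) :
    pvProcSymA terms (nb, st) sym = (nb ++ [T.getD sym sym], pvCollectSym terms st sym) := by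
  unfold pvProcSymA pvCollectSym at *
  by_cases hmem : sym ∈ terms
  · by_cases hc : st.1.contains sym = true
    · have hcol : (if sym ∈ terms ∧ st.1.contains sym = false then
          let nn := pvFreshName st.2 ("T_" ++ sym)
          (st.1.insert sym nn, PySem.Set.add st.2 nn)
        else st) = st := by
        rw [if_neg]; simp [hc]
      rw [hcol] at hExt ⊢
      obtain ⟨v, hv⟩ : ∃ v, st.1.get? sym = some v := by
        rw [PySem.Dict.contains_eq_isSome_get?] at hc
        exact Option.isSome_iff_exists.1 hc
      have hT : T.get? sym = some v := hExt sym v hv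
      simp only [hmem, hc, if_pos]
      rw [PySem.Dict.getD_eq_get?_getD, PySem.Dict.getD_eq_get?_getD, hv, hT]
      simp
    · rw [Bool.not_eq_true] at hc
      have hcond : sym ∈ terms ∧ st.1.contains sym = false := ⟨hmem, hc⟩
      rw [if_pos hcond] at hExt ⊢
      simp only [hmem, hc, if_pos, Bool.false_eq_true, if_false]
      have hself : (st.1.insert sym (pvFreshName st.2 ("T_" ++ sym))).get? sym
          = some (pvFreshName st.2 ("T_" ++ sym)) := PySem.Dict.get?_insert_self _ _ _
      have hT : T.get? sym = some (pvFreshName st.2 ("T_" ++ sym)) := hExt _ _ hself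
      rw [PySem.Dict.getD_eq_get?_getD, PySem.Dict.getD_eq_get?_getD, hself, hT]
      simp
  · have hcol : ¬ (sym ∈ terms ∧ st.1.contains sym = false) := fun hh => hmem hh.1
    rw [if_neg hcol]
    simp only [hmem, if_false]
    have hnc : T.contains sym = false := by
      rcases Bool.eq_false_or_eq_true (T.contains sym) with h | h
      · exact absurd (hK sym h) hmem
      · exact h
    have hnone : T.get? sym = none := by
      rw [PySem.Dict.contains_eq_isSome_get?] at hnc
      cases hh : T.get? sym
      · rfl
      · rw [hh] at hnc; simp at hnc
    rw [PySem.Dict.getD_eq_get?_getD, hnone]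
    simp

-- A's inner loop over a whole body
theorem pvBodyA_eq (terms : List String) (body : List String) (nb : List String)
    (st : PySem.Dict String String × List String) (T : PySem.Dict String String)
    (hExt : pvExt (body.foldl (pvCollectSym terms) st).1 T) (hK : pvKeysTerms terms T) :
    body.foldl (pvProcSymA terms) (nb, st)
      = (nb ++ body.map (fun s => T.getD s s), body.foldl (pvCollectSym terms) st) := by
  induction body generalizing nb st with
  | nil => simp
  | cons s rest ih =>
    rw [List.foldl_cons] at hExt
    rw [List.foldl_cons, List.foldl_cons]
    rw [pvProcSymA_eq terms nb st s T
      (pvExt_trans (pvExt_foldl_collectSym terms rest _) hExt) hK]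
    rw [ih _ _ hExt]
    simp

-- A's loop over the bodies of one production
theorem pvBodiesA_eq (terms : List String) (bodies : List (List String))
    (acc : List (List String)) (st : PySem.Dict String String × List String)
    (T : PySem.Dict String String)
    (hExt : pvExt (pvCollectBodies terms st bodies).1 T) (hK : pvKeysTerms terms T) :
    bodies.foldl (pvBodyStepA terms) (acc, st)
      = (acc ++ bodies.map (pvRewriteBody T), pvCollectBodies terms st bodies) := by
  induction bodies generalizing acc st with
  | nil => simp [pvCollectBodies]
  | cons b rest ih =>
    unfold pvCollectBodies at hExt ⊢
    rw [List.foldl_cons] at hExt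
    rw [List.foldl_cons, List.foldl_cons]
    by_cases hb : b.length < 2
    · have hstep : pvBodyStepA terms (acc, st) b = (acc ++ [b], pvCollectBody terms st b) := by
        unfold pvBodyStepA pvCollectBody
        rw [if_pos hb, if_pos hb]
      rw [hstep]
      have hrw : pvRewriteBody T b = b := by unfold pvRewriteBody; rw [if_pos hb]
      have := ih (acc ++ [b]) (pvCollectBody terms st b) hExt
      unfold pvCollectBodies at this
      rw [this]
      simp [hrw]
    · have hcb : pvCollectBody terms st b = b.foldl (pvCollectSym terms) st := by
        unfold pvCollectBody; rw [if_neg hb]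
      have hExtb : pvExt (b.foldl (pvCollectSym terms) st).1 T := by
        rw [← hcb]
        exact pvExt_trans (by
          have h2 := pvExt_collectBodies terms rest (pvCollectBody terms st b)
          unfold pvCollectBodies at h2
          exact h2) hExt
      have hstep : pvBodyStepA terms (acc, st) b
          = (acc ++ [b.map (fun s => T.getD s s)], pvCollectBody terms st b) := by
        unfold pvBodyStepA
        rw [if_neg hb]
        rw [pvBodyA_eq terms b [] st T hExtb hK, hcb]
        simp
      rw [hstep]
      have hrw : pvRewriteBody T b = b.map (fun s => T.getD s s) := by
        unfold pvRewriteBody; rw [if_neg hb]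
      have := ih (acc ++ [b.map (fun s => T.getD s s)]) (pvCollectBody terms st b) hExt
      unfold pvCollectBodies at this
      rw [this]
      simp [hrw]

-- association-list lookup under a clean prefix
theorem pvGet?_mk_append_cons (pre : List (String × List (List String))) (nt : String)
    (v : List (List String)) (rest : List (String × List (List String)))
    (hpre : nt ∉ pre.map Prod.fst) :
    (PySem.Dict.mk (pre ++ (nt, v) :: rest)).get? nt = some v := by
  induction pre with
  | nil => simp [PySem.Dict.get?_mk_cons]
  | cons p pre' ih =>
    rw [List.cons_append, PySem.Dict.get?_mk_cons]
    have hne : (p.1 == nt) = false := by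
      simp only [List.map_cons, List.mem_cons] at hpre
      simp [beq_eq_false_iff_ne]
      exact fun he => hpre (Or.inl he.symm)
    rw [hne]
    simp only [List.map_cons, List.mem_cons] at hpre
    exact ih (fun hm => hpre (Or.inr hm))

-- overwriting one key of an association list with unique keys
theorem pvMap_overwrite (pre rest : List (String × List (List String))) (nt : String)
    (v newv : List (List String)) (hpre : nt ∉ pre.map Prod.fst) (hrest : nt ∉ rest.map Prod.fst) :
    (pre ++ (nt, v) :: rest).map (fun p => if (p.1 == nt) = true then (nt, newv) else p)
      = pre ++ (nt, newv) :: rest := by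
  rw [List.map_append, List.map_cons]
  have h1 : pre.map (fun p => if (p.1 == nt) = true then (nt, newv) else p) = pre := by
    rw [List.map_congr_left (g := id) ?_, List.map_id]
    intro p hp
    have : p.1 ≠ nt := fun he => hpre (List.mem_map.2 ⟨p, hp, he⟩)
    simp [this]
  have h2 : rest.map (fun p => if (p.1 == nt) = true then (nt, newv) else p) = rest := by
    rw [List.map_congr_left (g := id) ?_, List.map_id]
    intro p hp
    have : p.1 ≠ nt := fun he => hrest (List.mem_map.2 ⟨p, hp, he⟩)
    simp [this]
  rw [h1, h2]
  simp

-- A's outer loop over the (remaining) keys = in-place rewrite of the items list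
theorem pvOuterA_eq (terms : List String) (post pre : List (String × List (List String)))
    (st : PySem.Dict String String × List String) (T : PySem.Dict String String)
    (hnd : ((pre ++ post).map Prod.fst).Nodup)
    (hExt : pvExt ((post.map Prod.snd).foldl (pvCollectBodies terms) st).1 T)
    (hK : pvKeysTerms terms T) :
    (post.map Prod.fst).foldl (pvKeyStepA terms) (PySem.Dict.mk (pre ++ post), st)
      = (PySem.Dict.mk (pre ++ post.map (fun p => (p.1, p.2.map (pvRewriteBody T)))),
         (post.map Prod.snd).foldl (pvCollectBodies terms) st) := by
  induction post generalizing pre st with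
  | nil => simp
  | cons p rest ih =>
    obtain ⟨nt, v⟩ := p
    have hnd' : (pre.map Prod.fst ++ nt :: rest.map Prod.fst).Nodup := by simpa using hnd
    rcases List.nodup_append.1 hnd' with ⟨_, hnd2, hdisj⟩
    have hrest : nt ∉ rest.map Prod.fst := (List.nodup_cons.1 hnd2).1
    have hpre : nt ∉ pre.map Prod.fst := fun hm => hdisj nt hm nt (by simp) rfl
    rw [List.map_cons, List.foldl_cons] at hExt
    simp only [List.map_cons, List.foldl_cons]
    have hget? := pvGet?_mk_append_cons pre nt v rest hpre
    have hget : (PySem.Dict.mk (pre ++ (nt, v) :: rest)).getD nt [] = v := by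
      rw [PySem.Dict.getD_eq_get?_getD, hget?]; rfl
    have hcont : (PySem.Dict.mk (pre ++ (nt, v) :: rest)).contains nt = true := by
      rw [PySem.Dict.contains_eq_isSome_get?, hget?]; rfl
    have hExtv : pvExt (pvCollectBodies terms st v).1 T :=
      pvExt_trans (pvExt_collectVals terms (rest.map Prod.snd) _) hExt
    have hbodies := pvBodiesA_eq terms v [] st T hExtv hK
    have hins : (PySem.Dict.mk (pre ++ (nt, v) :: rest)).insert nt (v.map (pvRewriteBody T))
        = PySem.Dict.mk (pre ++ (nt, v.map (pvRewriteBody T)) :: rest) := by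
      apply PySem.Dict.ext
      rw [PySem.Dict.items_insert_of_contains _ _ hcont]
      exact pvMap_overwrite pre rest nt v _ hpre hrest
    have hstep : pvKeyStepA terms (PySem.Dict.mk (pre ++ (nt, v) :: rest), st) nt
        = (PySem.Dict.mk (pre ++ (nt, v.map (pvRewriteBody T)) :: rest),
           pvCollectBodies terms st v) := by
      unfold pvKeyStepA
      simp only [hget, hbodies, List.nil_append, hins]
    rw [hstep]
    have hnd'' : (((pre ++ [(nt, v.map (pvRewriteBody T))]) ++ rest).map Prod.fst).Nodup := by
      rw [List.append_assoc, List.singleton_append]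
      simpa using hnd'
    have := ih (pre ++ [(nt, v.map (pvRewriteBody T))]) (pvCollectBodies terms st v) hnd'' hExt
    rw [List.append_assoc, List.singleton_append] at this
    rw [this]
    simp

-- ===== VERDICT (by name: the statement is the Claim_ definition above) =====
theorem step4_replace_terminals_py_spec : Claim_equal_step4_replace_terminals_py := by
  intro prods nts terms _
  unfold Spec_step4_replace_terminals_py step4_replace_terminals_py step4_replace_terminals_py_alt
  have hkeys : (PySem.Dict.ofList prods).keys = (PySem.Dict.ofList prods).items.map Prod.fst := rfl
  have hvals : (PySem.Dict.ofList prods).values = (PySem.Dict.ofList prods).items.map Prod.snd := rfl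
  have hnd : ((PySem.Dict.ofList prods).items.map Prod.fst).Nodup := by
    have := PySem.Dict.nodup_keys_ofList prods
    rwa [hkeys] at this
  have hK : pvKeysTerms terms
      (((PySem.Dict.ofList prods).items.map Prod.snd).foldl (pvCollectBodies terms)
        (PySem.Dict.empty, nts)).1 := by
    apply pvKeysTerms_collectVals
    intro k hk
    simp [PySem.Dict.contains_empty] at hk
  have houter := pvOuterA_eq terms (PySem.Dict.ofList prods).items [] (PySem.Dict.empty, nts)
    (((PySem.Dict.ofList prods).items.map Prod.snd).foldl (pvCollectBodies terms)
      (PySem.Dict.empty, nts)).1 (by simpa using hnd) (pvExt_refl _) hK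
  simp only [List.nil_append] at houter
  have hmk : PySem.Dict.mk (PySem.Dict.ofList prods).items = PySem.Dict.ofList prods := rfl
  rw [hmk] at houter
  dsimp only
  rw [hkeys, hvals, houter]
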